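-- pv_equiv track=rewrite | github.com/algorithm-pick/algorithm | programmers/level_2/42860/choi.py | solution
-- ===== SOURCE A (Python) =====
-- def solution(name):
--     name_ascii = []
--
--     for i in name:
--         target = ord(i)-ord('A')
--         if target > 13:
--             target = 26-target
--         name_ascii.append(target)
--
--     answer = sum(name_ascii)
--     psum = answer
--     left, right, cnt = 1, -1, -1
--
--     if psum == 0:
--         return 0
--
--     while psum != 0:
--         left -= 1
--         right += 1
--         cnt += 1
--
--         if left < 0:
--             left = len(name)-1
--
--         if right > len(name)-1:
--             right = 0
--
--         if name_ascii[left] != 0: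
--             psum -= name_ascii[left]
--             name_ascii[left] = 0
--             right = left
--
--         elif name_ascii[right] != 0:
--             psum -= name_ascii[right]
--             name_ascii[right] = 0
--             left = right
--
--     answer += cnt
--
--     return answer
-- ===== SOURCE B (Python) =====
-- def solution(name):
--     n = len(name)
--     vals = [min(ord(c) - 65, 91 - ord(c)) for c in name]
--     total = sum(vals)
--     live = [i for i in range(n) if vals[i] != 0]
--     rem = total
--     pos = 0
--     moves = 0
--     while rem != 0:
--         d = min(min((pos - i) % n, (i - pos) % n) for i in live)
--         i = (pos - d) % n if (pos - d) % n in live else (pos + d) % n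
--         moves += d
--         rem -= vals[i]
--         live.remove(i)
--         pos = i
--     return total + moves
-- ===== Notes on version B (the rewrite author's own statement) =====
-- stated objective: simpler
-- what changed: Replaces A's lock-step two-pointer wraparound simulation (mutating the value array and stepping both cursors one cell per iteration) with a direct loop that keeps a list of still-nonzero indices and, per step, picks the nearest one by modular-distance arithmetic (left-preferring on ties), adding that distance.
import Mathlib
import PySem

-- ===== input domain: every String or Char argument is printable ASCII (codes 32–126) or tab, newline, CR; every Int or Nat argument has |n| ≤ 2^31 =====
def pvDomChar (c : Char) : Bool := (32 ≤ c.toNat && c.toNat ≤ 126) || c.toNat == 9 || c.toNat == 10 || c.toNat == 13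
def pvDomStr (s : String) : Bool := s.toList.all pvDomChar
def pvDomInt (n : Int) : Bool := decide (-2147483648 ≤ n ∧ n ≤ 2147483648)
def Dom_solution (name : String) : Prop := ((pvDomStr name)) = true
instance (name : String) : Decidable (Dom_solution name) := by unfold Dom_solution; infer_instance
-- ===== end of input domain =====

-- B replaces A's lock-step two-pointer wraparound simulation with a direct
-- nearest-live-index selection by modular distances (objective: simpler).

-- ===== PORT A =====
-- A's while-loop: state (a, psum, left, right, cnt), one iteration per step.
-- The fuel match is only a totalization guard; (n+1)^2 fuel is proven sufficient.
def solutionLoopA (fuel : Nat) (n : Int) (a : List Int) (psum left right cnt : Int) : Int :=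
  match fuel with
  | 0 => cnt
  | f + 1 =>
    if psum = 0 then cnt
    else
      let left := left - 1
      let right := right + 1
      let cnt := cnt + 1
      let left := if left < 0 then n - 1 else left
      let right := if right > n - 1 then 0 else right
      let al := PySem.List.pyGetD a left 0
      if al ≠ 0 then
        solutionLoopA f n (PySem.List.pySetD a left 0) (psum - al) left left cnt
      else
        let ar := PySem.List.pyGetD a right 0
        if ar ≠ 0 then
          solutionLoopA f n (PySem.List.pySetD a right 0) (psum - ar) right right cnt
        else
          solutionLoopA f n a psum left right cnt

def solution (name : String) : Int :=
  let name_ascii : List Int := name.toList.foldl (fun acc i =>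
      let target : Int := (i.toNat : Int) - 65
      let target := if target > 13 then 26 - target else target
      acc ++ [target]) []
  let answer := name_ascii.sum
  let psum := answer
  if psum = 0 then 0
  else
    let n : Int := (name.toList.length : Int)
    answer + solutionLoopA ((name.toList.length + 1) * (name.toList.length + 1)) n name_ascii psum 1 (-1) (-1)

-- ===== PORT B =====
-- min((pos-i)%n, (i-pos)%n) : the Source B circular-distance expression
def cdist (n pos i : Int) : Int := min (PySem.Int.mod (pos - i) n) (PySem.Int.mod (i - pos) n)

-- min(cdist over live) : Python's min over a nonempty iterable, as a fold; [] unreachable (rem ≠ 0)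
def minDist (n pos : Int) (live : List Int) : Int :=
  match live with
  | [] => 0
  | j :: rest => rest.foldl (fun m i => min m (cdist n pos i)) (cdist n pos j)

def solutionLoopB (fuel : Nat) (n : Int) (vals live : List Int) (rem pos moves : Int) : Int :=
  match fuel with
  | 0 => moves  -- totalization guard: fuel = |live| is exact
  | f + 1 =>
    if rem = 0 then moves
    else
      let d := minDist n pos live
      let c := PySem.Int.mod (pos - d) n
      let i := if c ∈ live then c else PySem.Int.mod (pos + d) n
      solutionLoopB f n vals (live.erase i) (rem - PySem.List.pyGetD vals i 0) i (moves + d)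

def solution_alt (name : String) : Int :=
  let n : Int := (name.toList.length : Int)
  let vals : List Int := name.toList.map (fun c => min ((c.toNat : Int) - 65) (91 - (c.toNat : Int)))
  let total := vals.sum
  let live := (PySem.List.pyRange 0 n 1).filter (fun i => decide (PySem.List.pyGetD vals i 0 ≠ 0))
  total + solutionLoopB live.length n vals live total 0 0

-- ===== PRECONDITION & SPEC =====
def Spec_solution (name : String) (out : Int) : Prop := out = solution_alt name
instance (name : String) (out : Int) : Decidable (Spec_solution name out) := by
  unfold Spec_solution; infer_instance

-- ===== CLAIM =====
def Claim_equal_solution : Prop := ∀ (name : String), Dom_solution name → Spec_solution name (solution name)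


-- ===== LEMMAS AND PROOFS =====

-- modular arithmetic helpers
lemma pv_sub_emod_emod (p b N : Int) : (p - b % N) % N = (p - b) % N :=
  Int.ModEq.sub (Int.ModEq.refl p) (Int.emod_emod_of_dvd b dvd_rfl)

lemma pv_emod_sub_emod (b p N : Int) : (b % N - p) % N = (b - p) % N :=
  Int.ModEq.sub (Int.emod_emod_of_dvd b dvd_rfl) (Int.ModEq.refl p)

lemma pv_add_emod_emod (p b N : Int) : (p + b % N) % N = (p + b) % N :=
  Int.ModEq.add (Int.ModEq.refl p) (Int.emod_emod_of_dvd b dvd_rfl)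

lemma pv_emod_add_emod (b c N : Int) : (b % N + c) % N = (b + c) % N :=
  Int.ModEq.add (Int.emod_emod_of_dvd b dvd_rfl) (Int.ModEq.refl c)

lemma pv_emod_self_of (N x : Int) (h0 : 0 ≤ x) (hx : x < N) : x % N = x :=
  Int.emod_eq_of_lt h0 hx

lemma pv_emod_nonneg (N a : Int) (hN : 0 < N) : 0 ≤ a % N := Int.emod_nonneg a (by omega)
lemma pv_emod_lt (N a : Int) (hN : 0 < N) : a % N < N := Int.emod_lt_of_pos a hN

-- fold-min lemmas
lemma foldl_min_le_init (g : Int → Int) (l : List Int) (init : Int) :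
    l.foldl (fun m i => min m (g i)) init ≤ init := by
  induction l generalizing init with
  | nil => simp
  | cons x xs ih =>
    simp only [List.foldl_cons]
    exact le_trans (ih _) (min_le_left _ _)

lemma foldl_min_le_mem (g : Int → Int) (l : List Int) (init x : Int) (hx : x ∈ l) :
    l.foldl (fun m i => min m (g i)) init ≤ g x := by
  induction l generalizing init with
  | nil => simp at hx
  | cons y ys ih =>
    simp only [List.foldl_cons]
    rcases List.mem_cons.mp hx with h | h
    · subst h
      exact le_trans (foldl_min_le_init g ys _) (min_le_right _ _)
    · exact ih _ h

lemma foldl_min_attain (g : Int → Int) (l : List Int) (init : Int) :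
    l.foldl (fun m i => min m (g i)) init = init ∨
      ∃ x ∈ l, l.foldl (fun m i => min m (g i)) init = g x := by
  induction l generalizing init with
  | nil => left; rfl
  | cons y ys ih =>
    simp only [List.foldl_cons]
    rcases ih (min init (g y)) with h | ⟨x, hx, h⟩
    · rcases le_total init (g y) with hm | hm
      · left; rw [h, min_eq_left hm]
      · right; exact ⟨y, List.mem_cons_self .., by rw [h, min_eq_right hm]⟩
    · right; exact ⟨x, List.mem_cons_of_mem _ hx, h⟩

-- cdist / minDist layer
lemma cdist_eq (N p i : Int) (hN : 0 < N) :
    cdist N p i = min ((p - i) % N) ((i - p) % N) := by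
  unfold cdist
  rw [PySem.Int.mod_eq_emod_of_pos hN, PySem.Int.mod_eq_emod_of_pos hN]

lemma cdist_nonneg (N p i : Int) (hN : 0 < N) : 0 ≤ cdist N p i := by
  rw [cdist_eq _ _ _ hN]
  exact le_min (pv_emod_nonneg _ _ hN) (pv_emod_nonneg _ _ hN)

lemma cdist_lt (N p i : Int) (hN : 0 < N) : cdist N p i < N := by
  rw [cdist_eq _ _ _ hN]
  exact lt_of_le_of_lt (min_le_left _ _) (pv_emod_lt _ _ hN)

lemma cdist_eq_zero (N p i : Int) (hN : 0 < N) (hp0 : 0 ≤ p) (hpN : p < N)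
    (hi0 : 0 ≤ i) (hiN : i < N) (h : cdist N p i = 0) : i = p := by
  rw [cdist_eq _ _ _ hN] at h
  have h1 : (p - i) % N = 0 ∨ (i - p) % N = 0 := by
    have := pv_emod_nonneg N (p - i) hN
    have := pv_emod_nonneg N (i - p) hN
    omega
  have hp' : p % N = p := pv_emod_self_of _ _ hp0 hpN
  have hi' : i % N = i := pv_emod_self_of _ _ hi0 hiN
  rcases h1 with h1 | h1
  · have := (Int.emod_emod_of_dvd p (dvd_refl N))
    have h2 : p % N = i % N := by
      rw [Int.emod_eq_emod_iff_emod_sub_eq_zero]; exact h1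
    omega
  · have h2 : i % N = p % N := by
      rw [Int.emod_eq_emod_iff_emod_sub_eq_zero]; exact h1
    omega

lemma cdist_probe_left (N p d : Int) (hN : 0 < N) (hd0 : 0 ≤ d) (hdN : d < N) :
    cdist N p ((p - d) % N) ≤ d := by
  rw [cdist_eq _ _ _ hN]
  have h1 : (p - (p - d) % N) % N = d := by
    rw [pv_sub_emod_emod]
    have : p - (p - d) = d := by ring
    rw [this, pv_emod_self_of _ _ hd0 hdN]
  calc min ((p - (p - d) % N) % N) (((p - d) % N - p) % N) ≤ (p - (p - d) % N) % N :=
        min_le_left _ _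
    _ = d := h1

lemma cdist_probe_right (N p d : Int) (hN : 0 < N) (hd0 : 0 ≤ d) (hdN : d < N) :
    cdist N p ((p + d) % N) ≤ d := by
  rw [cdist_eq _ _ _ hN]
  have h1 : ((p + d) % N - p) % N = d := by
    rw [pv_emod_sub_emod]
    have : p + d - p = d := by ring
    rw [this, pv_emod_self_of _ _ hd0 hdN]
  calc min ((p - (p + d) % N) % N) (((p + d) % N - p) % N) ≤ ((p + d) % N - p) % N :=
        min_le_right _ _
    _ = d := h1

lemma cdist_attain_probe (N p j D : Int) (hN : 0 < N) (hj0 : 0 ≤ j) (hjN : j < N)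
    (h : cdist N p j = D) : j = (p - D) % N ∨ j = (p + D) % N := by
  rw [cdist_eq _ _ _ hN] at h
  have hj' : j % N = j := pv_emod_self_of _ _ hj0 hjN
  rcases min_cases ((p - j) % N) ((j - p) % N) with ⟨he, _⟩ | ⟨he, _⟩
  · left
    rw [← h, he, pv_sub_emod_emod]
    have : p - (p - j) = j := by ring
    rw [this, hj']
  · right
    rw [← h, he, pv_add_emod_emod]
    have : p + (j - p) = j := by ring
    rw [this, hj']

lemma minDist_le (N p : Int) (live : List Int) (j : Int) (hj : j ∈ live) :
    minDist N p live ≤ cdist N p j := by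
  cases live with
  | nil => simp at hj
  | cons y ys =>
    simp only [minDist]
    rcases List.mem_cons.mp hj with h | h
    · subst h; exact foldl_min_le_init _ _ _
    · exact foldl_min_le_mem _ _ _ _ h

lemma minDist_attain (N p : Int) (live : List Int) (hne : live ≠ []) :
    ∃ j ∈ live, minDist N p live = cdist N p j := by
  cases live with
  | nil => exact absurd rfl hne
  | cons y ys =>
    simp only [minDist]
    rcases foldl_min_attain (cdist N p) ys (cdist N p y) with h | ⟨x, hx, h⟩
    · exact ⟨y, List.mem_cons_self .., h⟩
    · exact ⟨x, List.mem_cons_of_mem _ hx, h⟩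

lemma minDist_nonneg (N p : Int) (live : List Int) (hN : 0 < N) (hne : live ≠ []) :
    0 ≤ minDist N p live := by
  obtain ⟨j, _, h⟩ := minDist_attain N p live hne
  rw [h]; exact cdist_nonneg _ _ _ hN

lemma minDist_lt (N p : Int) (live : List Int) (hN : 0 < N) (hne : live ≠ []) :
    minDist N p live < N := by
  obtain ⟨j, _, h⟩ := minDist_attain N p live hne
  rw [h]; exact cdist_lt _ _ _ hN

-- the consumed index: the left probe if live, else the right probe (A's tie rule = B's rule)
def pick (N p : Int) (live : List Int) : Int :=
  if (p - minDist N p live) % N ∈ live then (p - minDist N p live) % N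
  else (p + minDist N p live) % N

lemma pick_mem (N p : Int) (live : List Int) (hN : 0 < N)
    (hb : ∀ j ∈ live, 0 ≤ j ∧ j < N) (hne : live ≠ []) : pick N p live ∈ live := by
  obtain ⟨j, hj, hdj⟩ := minDist_attain N p live hne
  obtain ⟨hj0, hjN⟩ := hb j hj
  rcases cdist_attain_probe N p j _ hN hj0 hjN hdj.symm with h | h
  · unfold pick
    rw [if_pos (h ▸ hj)]
    exact h ▸ hj
  · unfold pick
    split_ifs with hc
    · exact hc
    · exact h ▸ hj

lemma pick_range (N p : Int) (live : List Int) (hN : 0 < N) :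
    0 ≤ pick N p live ∧ pick N p live < N := by
  unfold pick
  split_ifs <;> exact ⟨pv_emod_nonneg _ _ hN, pv_emod_lt _ _ hN⟩

-- wrap steps of A's loop as emod
lemma wrapL_eq (N x : Int) (hN : 0 < N) (h0 : 0 ≤ x) (hx : x < N) :
    (if x - 1 < 0 then N - 1 else x - 1) = (x - 1) % N := by
  split_ifs with h
  · have hx0 : x = 0 := by omega
    subst hx0
    have : (0 - 1 : Int) % N = (N - 1) % N := by
      rw [Int.emod_eq_emod_iff_emod_sub_eq_zero]
      have : (0 - 1 : Int) - (N - 1) = -N := by ring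
      rw [this]; simp
    rw [this, pv_emod_self_of _ _ (by omega) (by omega)]
  · rw [pv_emod_self_of _ _ (by omega) (by omega)]

lemma wrapR_eq (N x : Int) (_hN : 0 < N) (h0 : 0 ≤ x) (hx : x < N) :
    (if x + 1 > N - 1 then 0 else x + 1) = (x + 1) % N := by
  split_ifs with h
  · have hx0 : x = N - 1 := by omega
    subst hx0
    have : (N - 1 + 1 : Int) = N := by ring
    rw [this]; simp
  · rw [pv_emod_self_of _ _ (by omega) (by omega)]

-- INNER: from an in-scan state at offset d (probes (p∓d) % N), A's loop runs k+1 more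
-- iterations (k = minDist - d) and consumes exactly pick N p live.
lemma loopA_scan (vals : List Int) (N : Int) (hNv : N = (vals.length : Int))
    (a live : List Int) (psum p : Int)
    (hN : 0 < N) (hψ : psum ≠ 0)
    (halen : a.length = vals.length)
    (hmask : ∀ m : Nat, m < vals.length →
      a.getD m 0 = if ((m : Int) ∈ live) then vals.getD m 0 else 0)
    (hlive : ∀ i ∈ live, 0 ≤ i ∧ i < N ∧ vals.getD i.toNat 0 ≠ 0)
    (hne : live ≠ []) :
    ∀ (k d : Nat) (L R cnt : Int) (f : Nat),
    ((if L - 1 < 0 then N - 1 else L - 1) = (p - (d : Int)) % N) →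
    ((if R + 1 > N - 1 then 0 else R + 1) = (p + (d : Int)) % N) →
    ((d : Int) + (k : Int) = minDist N p live) →
    (k + 1 ≤ f) →
    solutionLoopA f N a psum L R cnt =
      solutionLoopA (f - (k + 1)) N (PySem.List.pySetD a (pick N p live) 0)
        (psum - vals.getD (pick N p live).toNat 0) (pick N p live) (pick N p live)
        (cnt + (k : Int) + 1) := by
  have hb : ∀ j ∈ live, 0 ≤ j ∧ j < N := fun j hj => ⟨(hlive j hj).1, (hlive j hj).2.1⟩
  have hD0 : 0 ≤ minDist N p live := minDist_nonneg N p live hN hne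
  have hDN : minDist N p live < N := minDist_lt N p live hN hne
  -- a value at an index not in live is 0; at an index in live it is vals there and nonzero
  have hval : ∀ x : Int, 0 ≤ x → x < N →
      PySem.List.pyGetD a x 0 = if x ∈ live then vals.getD x.toNat 0 else 0 := by
    intro x hx0 hxN
    have hxlen : x.toNat < vals.length := by omega
    rw [PySem.List.pyGetD_eq_getElem a 0 hx0 (by rw [halen]; omega)]
    have := hmask x.toNat hxlen
    rw [Int.toNat_of_nonneg hx0] at this
    rw [← List.getD_eq_getElem a 0 (by omega), this]
  intro k
  induction k with
  | zero =>
    intro d L R cnt f hL hR hD hf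
    obtain ⟨f', rfl⟩ : ∃ f', f = f' + 1 := ⟨f - 1, by omega⟩
    have hdD : (d : Int) = minDist N p live := by omega
    simp only [solutionLoopA, if_neg hψ]
    rw [hL, hR, hdD]
    set D := minDist N p live with hDdef
    have hlp0 : 0 ≤ (p - D) % N := pv_emod_nonneg _ _ hN
    have hlpN : (p - D) % N < N := pv_emod_lt _ _ hN
    have hrp0 : 0 ≤ (p + D) % N := pv_emod_nonneg _ _ hN
    have hrpN : (p + D) % N < N := pv_emod_lt _ _ hN
    by_cases hc : (p - D) % N ∈ live
    · have hpick : pick N p live = (p - D) % N := by unfold pick; rw [if_pos hc]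
      have hv : vals.getD ((p - D) % N).toNat 0 ≠ 0 := (hlive _ hc).2.2
      rw [hval _ hlp0 hlpN, if_pos hc]
      rw [if_pos hv]
      rw [hpick]
      norm_num
    · have hpick : pick N p live = (p + D) % N := by unfold pick; rw [if_neg hc]
      have hrc : (p + D) % N ∈ live := by
        obtain ⟨j, hj, hdj⟩ := minDist_attain N p live hne
        obtain ⟨hj0, hjN⟩ := hb j hj
        rcases cdist_attain_probe N p j D hN hj0 hjN hdj.symm with h | h
        · exact absurd (h ▸ hj) hc
        · exact h ▸ hj
      have hv : vals.getD ((p + D) % N).toNat 0 ≠ 0 := (hlive _ hrc).2.2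
      rw [hval _ hlp0 hlpN, if_neg hc]
      rw [if_neg (show ¬((0:Int) ≠ 0) by norm_num)]
      rw [hval _ hrp0 hrpN, if_pos hrc]
      rw [if_pos hv]
      rw [hpick]
      norm_num
  | succ k ih =>
    intro d L R cnt f hL hR hD hf
    obtain ⟨f', rfl⟩ : ∃ f', f = f' + 1 := ⟨f - 1, by omega⟩
    have hdD : (d : Int) < minDist N p live := by push_cast at hD ⊢; omega
    have hd0 : (0 : Int) ≤ (d : Int) := by positivity
    have hdN : (d : Int) < N := by omega
    have hlp0 : 0 ≤ (p - (d : Int)) % N := pv_emod_nonneg _ _ hN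
    have hlpN : (p - (d : Int)) % N < N := pv_emod_lt _ _ hN
    have hrp0 : 0 ≤ (p + (d : Int)) % N := pv_emod_nonneg _ _ hN
    have hrpN : (p + (d : Int)) % N < N := pv_emod_lt _ _ hN
    have hlnot : (p - (d : Int)) % N ∉ live := by
      intro hmem
      have h1 := minDist_le N p live _ hmem
      have h2 := cdist_probe_left N p (d : Int) hN hd0 hdN
      omega
    have hrnot : (p + (d : Int)) % N ∉ live := by
      intro hmem
      have h1 := minDist_le N p live _ hmem
      have h2 := cdist_probe_right N p (d : Int) hN hd0 hdN
      omega
    simp only [solutionLoopA, if_neg hψ]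
    rw [hL, hR, hval _ hlp0 hlpN, if_neg hlnot, hval _ hrp0 hrpN, if_neg hrnot]
    rw [if_neg (show ¬((0:Int) ≠ 0) by norm_num), if_neg (show ¬((0:Int) ≠ 0) by norm_num)]
    have step := ih (d + 1) ((p - (d : Int)) % N) ((p + (d : Int)) % N) (cnt + 1) f'
      (by rw [wrapL_eq N _ hN hlp0 hlpN, pv_emod_sub_emod]
          congr 1
          push_cast
          ring)
      (by rw [wrapR_eq N _ hN hrp0 hrpN, pv_emod_add_emod]
          congr 1
          push_cast
          ring)
      (by push_cast at hD ⊢; omega)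
      (by omega)
    rw [step]
    have hcnt : cnt + 1 + (k : Int) + 1 = cnt + ((k : Nat) + 1 : Nat) + 1 := by
      push_cast; ring
    rw [hcnt]
    congr 1
    omega

lemma loopB_zero (fuel : Nat) (n : Int) (vals live : List Int) (pos moves : Int) :
    solutionLoopB fuel n vals live 0 pos moves = moves := by
  cases fuel <;> simp [solutionLoopB]

-- OUTER: A's loop from any in-scan state equals B's loop, by strong induction on |live|
lemma loopAB (vals : List Int) (N : Int) (hNv : N = (vals.length : Int)) :
    ∀ (len : Nat) (live a : List Int), live.length = len →
    ∀ (psum p moves : Int) (d : Nat) (L R : Int) (fA : Nat),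
    0 < N → 0 ≤ p → p < N →
    a.length = vals.length →
    (∀ m : Nat, m < vals.length →
      a.getD m 0 = if ((m : Int) ∈ live) then vals.getD m 0 else 0) →
    live.Nodup →
    (∀ i ∈ live, 0 ≤ i ∧ i < N ∧ vals.getD i.toNat 0 ≠ 0) →
    psum = (live.map (fun i => vals.getD i.toNat 0)).sum →
    ((if L - 1 < 0 then N - 1 else L - 1) = (p - (d : Int)) % N) →
    ((if R + 1 > N - 1 then 0 else R + 1) = (p + (d : Int)) % N) →
    (live ≠ [] → (d : Int) ≤ minDist N p live) →
    (psum = 0 → d = 1) →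
    ((live.length + 1) * vals.length + 1 ≤ fA) →
    solutionLoopA fA N a psum L R (moves + (d : Int) - 1) =
      solutionLoopB live.length N vals live psum p moves := by
  intro len
  induction len using Nat.strong_induction_on with
  | _ len IH =>
    intro live a hlen psum p moves d L R fA hN hp0 hpN halen hmask hnodup hlive hsum hL hR hdD hd1 hfA
    by_cases hψ : psum = 0
    · subst hψ
      have hd : d = 1 := hd1 rfl
      subst hd
      obtain ⟨f', rfl⟩ : ∃ f', fA = f' + 1 := ⟨fA - 1, by omega⟩
      rw [loopB_zero]
      simp [solutionLoopA]
    · have hne : live ≠ [] := by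
        intro h
        subst h
        simp at hsum
        exact hψ hsum
      set D := minDist N p live with hDdef
      have hD0 : 0 ≤ D := minDist_nonneg N p live hN hne
      have hDN : D < N := minDist_lt N p live hN hne
      have hdleD : (d : Int) ≤ D := hdD hne
      obtain ⟨k, hk⟩ : ∃ k : Nat, (d : Int) + (k : Int) = D := ⟨(D - d).toNat, by omega⟩
      have hnlen : 0 < vals.length := by omega
      have hkb : k + 1 ≤ vals.length := by omega
      have hfA1 : k + 1 ≤ fA := by nlinarith [hfA, hlen]
      have hb : ∀ j ∈ live, 0 ≤ j ∧ j < N := fun j hj => ⟨(hlive j hj).1, (hlive j hj).2.1⟩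
      have hpm : pick N p live ∈ live := pick_mem N p live hN hb hne
      obtain ⟨hpk0, hpkN⟩ := pick_range N p live hN
      have hscan := loopA_scan vals N hNv a live psum p hN hψ halen hmask hlive hne
        k d L R (moves + (d : Int) - 1) fA hL hR hk hfA1
      rw [hscan]
      -- unfold B one step
      obtain ⟨j, rest, rfl⟩ : ∃ j rest, live = j :: rest := by
        cases live with
        | nil => exact absurd rfl hne
        | cons j rest => exact ⟨j, rest, rfl⟩
      simp only [List.length_cons, solutionLoopB, if_neg hψ]
      rw [show PySem.Int.mod (p - minDist N p (j :: rest)) N =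
            (p - minDist N p (j :: rest)) % N from PySem.Int.mod_eq_emod_of_pos hN]
      rw [show PySem.Int.mod (p + minDist N p (j :: rest)) N =
            (p + minDist N p (j :: rest)) % N from PySem.Int.mod_eq_emod_of_pos hN]
      rw [show (if (p - minDist N p (j :: rest)) % N ∈ j :: rest
            then (p - minDist N p (j :: rest)) % N
            else (p + minDist N p (j :: rest)) % N) = pick N p (j :: rest) from rfl]
      set live := j :: rest with hlivedef
      set i' := pick N p live with hi'
      have hliveLen : live.length = rest.length + 1 := by rw [hlivedef]; rfl
      have herase : (live.erase i').length = rest.length := by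
        rw [List.length_erase_of_mem hpm, hliveLen]
        omega
      have hvv : PySem.List.pyGetD vals i' 0 = vals.getD i'.toNat 0 := by
        rw [PySem.List.pyGetD_eq_getElem vals 0 hpk0 (by omega),
          List.getD_eq_getElem vals 0 (by omega)]
      have hperm : live.Perm (i' :: live.erase i') := List.perm_cons_erase hpm
      have hsum' : psum - vals.getD i'.toNat 0 =
          ((live.erase i').map (fun i => vals.getD i.toNat 0)).sum := by
        have := List.Perm.sum_eq (List.Perm.map (fun i => vals.getD i.toNat 0) hperm)
        rw [hsum, this]
        simp
      have hmask' : ∀ m : Nat, m < vals.length →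
          (PySem.List.pySetD a i' 0).getD m 0 =
            if ((m : Int) ∈ live.erase i') then vals.getD m 0 else 0 := by
        intro m hm
        rw [PySem.List.pySetD_of_nonneg a 0 hpk0]
        have hms : (a.set i'.toNat 0).getD m 0 = if i'.toNat = m then 0 else a.getD m 0 := by
          rw [List.getD_eq_getElem _ 0 (by simpa using (by omega : m < a.length)),
            List.getElem_set]
          split_ifs with h
          · rfl
          · exact (List.getD_eq_getElem a 0 (by omega)).symm
        rw [hms, hmask m hm]
        by_cases h : i'.toNat = m
        · have hmi : (m : Int) = i' := by omega
          rw [if_pos h, if_neg]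
          intro hmem
          exact (hnodup.mem_erase_iff.mp hmem).1 hmi
        · have hmi : (m : Int) ≠ i' := by omega
          rw [if_neg h]
          by_cases hmem : (m : Int) ∈ live
          · rw [if_pos hmem, if_pos (hnodup.mem_erase_iff.mpr ⟨hmi, hmem⟩)]
          · rw [if_neg hmem, if_neg (fun hc => hmem (List.mem_of_mem_erase hc))]
      have hlive' : ∀ i ∈ live.erase i', 0 ≤ i ∧ i < N ∧ vals.getD i.toNat 0 ≠ 0 :=
        fun i hi => hlive i (List.mem_of_mem_erase hi)
      have hdD' : live.erase i' ≠ [] → (1 : Int) ≤ minDist N i' (live.erase i') := by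
        intro hne'
        obtain ⟨j2, hj2, hdj2⟩ := minDist_attain N i' (live.erase i') hne'
        have hj2b := hlive' j2 hj2
        have hcd0 : 0 ≤ cdist N i' j2 := cdist_nonneg _ _ _ hN
        have : cdist N i' j2 ≠ 0 := by
          intro h0
          have := cdist_eq_zero N i' j2 hN hpk0 hpkN hj2b.1 hj2b.2.1 h0
          subst this
          exact (hnodup.mem_erase_iff.mp hj2).1 rfl
        omega
      have hrec := IH rest.length (by omega) (live.erase i') (PySem.List.pySetD a i' 0)
        herase (psum - vals.getD i'.toNat 0) i' (moves + D) 1 i' i' (fA - (k + 1))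
        hN hpk0 hpkN (by rw [PySem.List.pySetD_of_nonneg a 0 hpk0]; simp [halen])
        hmask' (hnodup.erase i') hlive' hsum'
        (by rw [wrapL_eq N i' hN hpk0 hpkN]; norm_num)
        (by rw [wrapR_eq N i' hN hpk0 hpkN]; norm_num)
        hdD' (fun _ => rfl)
        (by
          rw [herase]
          have hexp : (rest.length + 1 + 1) * vals.length =
              (rest.length + 1) * vals.length + vals.length := by ring
          have h2 : (rest.length + 1) * vals.length + vals.length + 1 ≤ fA := by
            rw [← hexp]
            calc (rest.length + 1 + 1) * vals.length + 1
                = (live.length + 1) * vals.length + 1 := by rw [hliveLen]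
              _ ≤ fA := hfA
          generalize (rest.length + 1) * vals.length = P at h2 ⊢
          omega)
      have hcnt : moves + (d : Int) - 1 + (k : Int) + 1 = moves + D + ((1 : Nat) : Int) - 1 := by
        push_cast
        omega
      rw [hvv, hcnt]
      rw [herase] at hrec
      exact hrec


-- top-level bridging lemmas
lemma map_getD_range (vals : List Int) :
    (List.range vals.length).map (fun k => vals.getD k 0) = vals := by
  apply List.ext_getElem
  · simp
  · intro i h1 h2
    simp only [List.getElem_map, List.getElem_range]
    rw [List.getD_eq_getElem _ 0 h2]

lemma sum_filter_nonzero (g : Nat → Int) (l : List Nat) :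
    ((l.filter (fun k => decide (g k ≠ 0))).map g).sum = (l.map g).sum := by
  induction l with
  | nil => rfl
  | cons x xs ih =>
    rw [List.filter_cons]
    by_cases h : g x = 0
    · rw [if_neg (by simp [h]), List.map_cons, List.sum_cons, ih, h, zero_add]
    · rw [if_pos (by simp [h]), List.map_cons, List.map_cons, List.sum_cons, List.sum_cons, ih]

lemma live_char (vals : List Int) :
    (PySem.List.pyRange 0 (vals.length : Int) 1).filter
        (fun i => decide (PySem.List.pyGetD vals i 0 ≠ 0)) =
      List.map (fun k : Nat => (k : Int))
        ((List.range vals.length).filter (fun k => decide (vals.getD k 0 ≠ 0))) := by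
  rw [PySem.List.pyRange_zero_natCast, List.filter_map]
  exact congrArg _ (List.filter_congr (fun k _ => by
    simp [Function.comp, PySem.List.pyGetD_natCast]))

lemma foldlA_eq_map (l : List Char) (acc : List Int) :
    l.foldl (fun acc i =>
      let target : Int := (i.toNat : Int) - 65
      let target := if target > 13 then 26 - target else target
      acc ++ [target]) acc =
      acc ++ l.map (fun c => min ((c.toNat : Int) - 65) (91 - (c.toNat : Int))) := by
  induction l generalizing acc with
  | nil => simp
  | cons c cs ih =>
    rw [List.foldl_cons, ih]
    have hc : (if (c.toNat : Int) - 65 > 13 then 26 - ((c.toNat : Int) - 65)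
        else (c.toNat : Int) - 65) = min ((c.toNat : Int) - 65) (91 - (c.toNat : Int)) := by
      rw [min_def]
      split_ifs <;> omega
    simp only []
    rw [hc]
    simp

-- ===== VERDICT =====
theorem solution_spec : Claim_equal_solution := by
  unfold Claim_equal_solution Spec_solution
  intro name _
  unfold solution solution_alt
  simp only [foldlA_eq_map, List.nil_append]
  set chars := name.toList with hchars
  set fB : Char → Int := fun c => min ((c.toNat : Int) - 65) (91 - (c.toNat : Int)) with hfB
  set vals : List Int := chars.map fB with hvals
  have hlenv : chars.length = vals.length := by rw [hvals, List.length_map]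
  set N : Int := (chars.length : Int) with hNdef
  have hNv : N = (vals.length : Int) := by rw [hNdef, hlenv]
  by_cases hψ : vals.sum = 0
  · rw [if_pos hψ, hψ, loopB_zero]
    norm_num
  · rw [if_neg hψ]
    have hvne : vals ≠ [] := by
      intro h
      rw [h] at hψ
      exact hψ rfl
    have hnlen : 0 < vals.length := List.length_pos_iff.mpr hvne
    have hN : 0 < N := by rw [hNv]; exact_mod_cast hnlen
    set q : Nat → Bool := fun k => decide (vals.getD k 0 ≠ 0) with hq
    have hlivec : (PySem.List.pyRange 0 N 1).filter
        (fun i => decide (PySem.List.pyGetD vals i 0 ≠ 0)) =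
        List.map (fun k : Nat => (k : Int)) ((List.range vals.length).filter q) := by
      rw [hNv]
      exact live_char vals
    set live : List Int := List.map (fun k : Nat => (k : Int))
      ((List.range vals.length).filter q) with hlivedef
    rw [hlivec]
    have hmemlive : ∀ m : Nat, ((m : Int) ∈ live ↔ (m ∈ List.range vals.length ∧ q m)) := by
      intro m
      constructor
      · intro h
        obtain ⟨k, hk, hkm⟩ := List.mem_map.mp h
        have : k = m := by exact_mod_cast hkm
        subst this
        exact List.mem_filter.mp hk
      · intro ⟨h1, h2⟩
        exact List.mem_map.mpr ⟨m, List.mem_filter.mpr ⟨h1, h2⟩, rfl⟩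
    have hmask : ∀ m : Nat, m < vals.length →
        vals.getD m 0 = if ((m : Int) ∈ live) then vals.getD m 0 else 0 := by
      intro m hm
      by_cases hg : vals.getD m 0 = 0
      · split_ifs <;> simpa using hg
      · rw [if_pos ((hmemlive m).mpr ⟨List.mem_range.mpr hm, by simpa [hq] using hg⟩)]
    have hnodup : live.Nodup :=
      ((List.nodup_range).filter q).map (fun a b => by exact_mod_cast id)
    have hlive : ∀ i ∈ live, 0 ≤ i ∧ i < N ∧ vals.getD i.toNat 0 ≠ 0 := by
      intro i hi
      obtain ⟨k, hk, hki⟩ := List.mem_map.mp hi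
      obtain ⟨hkr, hkq⟩ := List.mem_filter.mp hk
      subst hki
      refine ⟨by positivity, ?_, ?_⟩
      · rw [hNv]
        exact_mod_cast List.mem_range.mp hkr
      · simpa [hq] using hkq
    have hsum : vals.sum = (live.map (fun i => vals.getD i.toNat 0)).sum := by
      rw [hlivedef, List.map_map]
      have : ((fun i : Int => vals.getD i.toNat 0) ∘ fun k : Nat => (k : Int)) =
          fun k : Nat => vals.getD k 0 := by
        funext k
        simp
      rw [this, hq, sum_filter_nonzero (fun k => vals.getD k 0) (List.range vals.length),
        map_getD_range]
    have hlle : live.length ≤ vals.length := by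
      rw [hlivedef, List.length_map]
      exact le_trans (List.length_filter_le _ _) (by rw [List.length_range])
    have hmain := loopAB vals N hNv live.length live vals rfl vals.sum 0 0 0 1 (-1)
      ((chars.length + 1) * (chars.length + 1))
      hN le_rfl hN rfl hmask hnodup hlive hsum
      (by norm_num)
      (by rw [if_neg (by omega)]; norm_num)
      (fun hne => by
        exact_mod_cast minDist_nonneg N 0 live hN hne)
      (fun h => absurd h hψ)
      (by
        rw [hlenv]
        have h1 : (live.length + 1) * vals.length ≤ (vals.length + 1) * vals.length :=
          Nat.mul_le_mul_right _ (by omega)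
        have h2 : (vals.length + 1) * vals.length + (vals.length + 1) =
            (vals.length + 1) * (vals.length + 1) := by ring
        omega)
    have hm1 : (0 : Int) + ((0 : Nat) : Int) - 1 = -1 := by norm_num
    rw [hm1] at hmain
    rw [hmain]
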